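-- pv_equiv track=rewrite | github.com/SidoJain/AOC-2025 | d6p2.py | solve_cephalopod_worksheet
-- ===== SOURCE A (Python) =====
-- def solve_cephalopod_worksheet(worksheet: list[str]) -> int:
--     width = max(len(line) for line in worksheet)
--     grid = [line.ljust(width) for line in worksheet]
--     digit_rows = grid[:-1]
--     op_row = grid[-1]
--
--     total = 0
--     cur_num = []
--     cur_op = ""
--     for col in range(width - 1, -1, -1):
--         is_sep = True
--         for row in grid:
--             if row[col] != " ":
--                 is_sep = False
--                 break
--
--         if is_sep:
--             if cur_num:
--                 total += calculate_problem(cur_num, cur_op)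
--                 cur_num = []
--                 cur_op = ""
--             continue
--
--         num_str = ""
--         for row in digit_rows:
--             char = row[col]
--             if char.isdigit():
--                 num_str += char
--
--         if num_str:
--             cur_num.append(int(num_str))
--         op_char = op_row[col]
--         cur_op = op_char
--
--     if cur_num:
--         total += calculate_problem(cur_num, cur_op)
--     return total
--
-- def calculate_problem(numbers: list[int], op: str) -> int:
--     result = numbers[0]
--     for num in numbers[1:]:
--         if op == "+":
--             result += num
--         elif op == "*":
--             result *= num
--     return result
-- ===== SOURCE B (Python) =====
-- def solve_cephalopod_worksheet(worksheet: list[str]) -> int: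
--     width = max(len(line) for line in worksheet)
--     # transpose: the worksheet as a list of column strings (top to bottom, op char last)
--     cols = ["".join(line.ljust(width)[c] for line in worksheet) for c in range(width)]
--     total = 0
--     i, n = 0, len(cols)
--     while i < n:
--         if cols[i].strip(" ") == "":  # blank separator column
--             i += 1
--         else:
--             j = i
--             while j < n and cols[j].strip(" ") != "":
--                 j += 1
--             total += block_value(cols[i:j])
--             i = j
--     return total
--
-- def block_value(block: list[str]) -> int:
--     op = block[0][-1]
--     numbers = [int(ds) for ds in
--                ("".join(ch for ch in col[:-1] if ch.isdigit()) for col in reversed(block))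
--                if ds]
--     if not numbers:
--         return 0
--     if op == "+":
--         return sum(numbers)
--     if op == "*":
--         p = 1
--         for x in numbers:
--             p *= x
--         return p
--     return numbers[0]
-- ===== Notes on version B (the rewrite author's own statement) =====
-- stated objective: alternative
-- what changed: A makes one right-to-left character-level sweep over column indices carrying mutable (total, cur_num, cur_op) registers with the operator overwritten at every column; B first transposes the worksheet into a list of column strings, then walks that list block by block with two index pointers (skip blank columns, scan to the block end, slice the block) and evaluates each block as a whole (operator = last char of its first column, numbers from reversed columns, closed-form sum/product).
import Mathlib
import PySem

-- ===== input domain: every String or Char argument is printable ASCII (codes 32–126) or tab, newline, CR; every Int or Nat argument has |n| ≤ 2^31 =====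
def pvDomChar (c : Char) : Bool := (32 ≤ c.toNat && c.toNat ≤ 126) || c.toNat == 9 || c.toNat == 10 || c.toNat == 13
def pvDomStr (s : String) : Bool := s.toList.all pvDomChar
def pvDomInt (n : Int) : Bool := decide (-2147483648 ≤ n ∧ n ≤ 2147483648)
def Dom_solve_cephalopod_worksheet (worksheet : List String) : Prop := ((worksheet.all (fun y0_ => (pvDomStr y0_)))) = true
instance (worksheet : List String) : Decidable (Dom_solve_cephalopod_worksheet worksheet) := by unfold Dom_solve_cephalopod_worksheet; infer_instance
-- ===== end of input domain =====

-- B transposes the worksheet into column strings and walks the column list block by block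
-- (skip blanks / take a whole block / evaluate it with closed-form sum/product), instead of
-- A's right-to-left character sweep with mutable (total, cur_num, cur_op) state
-- (objective: alternative decomposition, same cost).

-- ===== PORT A =====
-- width = max(len(line) for line in worksheet); foldl-max equals Python's max on a nonempty list (Pre_)
def pvWidth (worksheet : List String) : Nat :=
  (worksheet.map (fun l => l.toList.length)).foldl max 0
-- line.ljust(width): exact (pads with spaces on the right)
def pvLjust (cs : List Char) (w : Nat) : List Char := cs ++ List.replicate (w - cs.length) ' '
def pvGrid (worksheet : List String) : List (List Char) :=
  worksheet.map (fun l => pvLjust l.toList (pvWidth worksheet))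
-- the 'for row in grid: if row[col] != " ": break' loop; row[col] is exact as getD since col < width = row.length
def pvIsSep (grid : List (List Char)) (col : Nat) : Bool :=
  grid.all (fun row => row.getD col ' ' == ' ')

-- calculate_problem; the [] case is unreachable (A calls it only with cur_num nonempty)
def pvCalcProblem (numbers : List Int) (op : List Char) : Int :=
  match numbers with
  | [] => 0
  | n :: rest => rest.foldl (fun r m => if op = ['+'] then r + m else if op = ['*'] then r * m else r) n

def pvStepA (grid digit_rows : List (List Char)) (op_row : List Char)
    (st : Int × List Int × List Char) (col : Nat) : Int × List Int × List Char :=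
  let (total, cur_num, cur_op) := st
  if pvIsSep grid col then
    if cur_num ≠ [] then (total + pvCalcProblem cur_num cur_op, [], []) else (total, cur_num, cur_op)
  else
    -- num_str: digits of the column, top to bottom; int(num_str) is exact here (nonempty, ASCII digits)
    let num_str := digit_rows.foldl (fun acc row =>
      if (row.getD col ' ').isDigit then acc ++ [row.getD col ' '] else acc) []
    let cur_num' := if num_str ≠ [] then cur_num ++ [(PySem.Int.ofChars? num_str).getD 0] else cur_num
    (total, cur_num', [op_row.getD col ' '])

def solve_cephalopod_worksheet (worksheet : List String) : Int :=
  let grid := pvGrid worksheet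
  let digit_rows := grid.dropLast
  let op_row := grid.getLastD []   -- grid[-1]; exact under Pre_ (worksheet ≠ [])
  let st := ((List.range (pvWidth worksheet)).reverse).foldl (pvStepA grid digit_rows op_row) (0, [], [])
  if st.2.1 ≠ [] then st.1 + pvCalcProblem st.2.1 st.2.2 else st.1

-- ===== PORT B =====
-- col.strip(" ") == "": the column string is all spaces (a separator column)
def pvBlank (col : List Char) : Bool := col.all (· == ' ')

-- the number spelled by one column string: digits of col[:-1] (the op row dropped), or None
def pvColNum (col : List Char) : Option Int :=
  let ds := col.dropLast.filter Char.isDigit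
  if ds ≠ [] then some ((PySem.Int.ofChars? ds).getD 0) else none  -- int(ds): exact, ds nonempty ASCII digits

-- block_value: op = block[0][-1] (ported as getLastD: block and its columns are nonempty whenever called)
def pvBlockValue (block : List (List Char)) : Int :=
  let op := (block.headD []).getLastD ' '
  let numbers := (block.reverse.map pvColNum).reduceOption
  if numbers ≠ [] then
    if op = '+' then numbers.sum
    else if op = '*' then numbers.foldl (· * ·) 1
    else numbers.headD 0
  else 0

-- the two while loops over the index pair (i, j): the suffix cols[i:] is the recursion state;
-- 'advance i past blanks' = dropWhile, 'scan j to the block end' / the slice cols[i:j] = takeWhile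
def pvSolveCols (cols : List (List Char)) : Int :=
  match h : cols.dropWhile pvBlank with
  | [] => 0
  | c :: cs =>
      pvBlockValue (c :: cs.takeWhile (fun col => !pvBlank col)) +
      pvSolveCols (cs.dropWhile (fun col => !pvBlank col))
termination_by cols.length
decreasing_by
  have h1 := List.length_dropWhile_le (fun col => !pvBlank col) cs
  have h2 : (c :: cs).length ≤ cols.length := h ▸ List.length_dropWhile_le pvBlank cols
  simp only [List.length_cons] at h2
  omega

def solve_cephalopod_worksheet_alt (worksheet : List String) : Int :=
  let width := pvWidth worksheet
  let cols := (List.range width).map (fun c =>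
    worksheet.map (fun l => (pvLjust l.toList width).getD c ' '))
  pvSolveCols cols

-- ===== PRECONDITION & SPEC =====
-- Pre_ excludes only the empty worksheet, on which both Pythons raise ValueError (max() of an empty sequence).
def Pre_solve_cephalopod_worksheet (worksheet : List String) : Prop := worksheet ≠ []
instance (worksheet : List String) : Decidable (Pre_solve_cephalopod_worksheet worksheet) := by
  unfold Pre_solve_cephalopod_worksheet; infer_instance

def pvWitness_solve_cephalopod_worksheet : List String := ["12", "+ "]

def Spec_solve_cephalopod_worksheet (worksheet : List String) (out : Int) : Prop :=
  out = solve_cephalopod_worksheet_alt worksheet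
instance (worksheet : List String) (out : Int) : Decidable (Spec_solve_cephalopod_worksheet worksheet out) := by
  unfold Spec_solve_cephalopod_worksheet; infer_instance

-- ===== CLAIM (what is proved, stated in full; the proofs are below) =====
def Claim_equal_solve_cephalopod_worksheet : Prop :=
  ∀ (worksheet : List String), Dom_solve_cephalopod_worksheet worksheet →
    Pre_solve_cephalopod_worksheet worksheet →
    Spec_solve_cephalopod_worksheet worksheet (solve_cephalopod_worksheet worksheet)

-- ===== LEMMAS AND PROOFS =====

-- reference evaluator for one group
def pvEvaluate (numbers : List Int) (op : Char) : Int :=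
  if op = '+' then numbers.sum
  else if op = '*' then numbers.foldl (· * ·) 1
  else numbers.headD 0

-- the number of one column, read off the digit rows
def pvNumberAt (digit_rows : List (List Char)) (col : Nat) : Option Int :=
  let digits := (digit_rows.map (fun row => row.getD col ' ')).filter Char.isDigit
  if digits ≠ [] then some ((PySem.Int.ofChars? digits).getD 0) else none

-- the column numbers of a run, rightmost column first
def pvNumsOf (N : Nat → Option Int) (P : List Nat) : List Int := (P.reverse.map N).reduceOption

-- the value contributed by one maximal run c :: P of non-separator columns
def pvGroupVal (N : Nat → Option Int) (o : Nat → Char) (c : Nat) (P : List Nat) : Int :=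
  if pvNumsOf N (c :: P) ≠ [] then pvEvaluate (pvNumsOf N (c :: P)) (o c) else 0

-- reference semantics: sum of run values over a column list
def pvG (s : Nat → Bool) (N : Nat → Option Int) (o : Nat → Char) : List Nat → Int
  | [] => 0
  | c :: L =>
    if s c then pvG s N o L
    else pvGroupVal N o c (L.takeWhile (fun x => !s x)) + pvG s N o (L.dropWhile (fun x => !s x))
termination_by L => L.length
decreasing_by
  · simp
  · simpa using Nat.lt_succ_of_le (List.length_dropWhile_le _ _)

theorem pvG_nil (s N o) : pvG s N o [] = 0 := by rw [pvG]

theorem pvG_cons (s : Nat → Bool) (N : Nat → Option Int) (o : Nat → Char) (c : Nat) (L : List Nat) :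
    pvG s N o (c :: L) =
      if s c then pvG s N o L
      else pvGroupVal N o c (L.takeWhile (fun x => !s x)) + pvG s N o (L.dropWhile (fun x => !s x)) := by
  rw [pvG]

theorem pvFoldlAdd (rest : List Int) (n : Int) :
    rest.foldl (fun r m => r + m) n = n + rest.sum := by
  induction rest generalizing n with
  | nil => simp
  | cons a t ih => simp [List.foldl, ih, add_assoc]

theorem pvFoldlMul (rest : List Int) (n : Int) :
    rest.foldl (· * ·) n = n * rest.foldl (· * ·) 1 := by
  induction rest generalizing n with
  | nil => simp
  | cons a t ih => simp only [List.foldl]; rw [ih, ih (1 * a)]; ring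

theorem pvCalc_eq_eval (n : Int) (rest : List Int) (c : Char) :
    pvCalcProblem (n :: rest) [c] = pvEvaluate (n :: rest) c := by
  by_cases h1 : c = '+'
  · subst h1
    simp [pvCalcProblem, pvEvaluate, pvFoldlAdd]
  · by_cases h2 : c = '*'
    · subst h2
      simp [pvCalcProblem, pvEvaluate, h1, pvFoldlMul rest n]
    · simp [pvCalcProblem, pvEvaluate, h1, h2]

-- ---------- B side: the column-string recursion computes the reference semantics ----------

-- the column of the grid at index c (as B's transposition builds it)
def pvColAt (g : List (List Char)) (c : Nat) : List Char := g.map (fun row => row.getD c ' ')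

theorem pvBlank_colAt (g : List (List Char)) (c : Nat) :
    pvBlank (pvColAt g c) = pvIsSep g c := by
  simp [pvBlank, pvColAt, pvIsSep, List.all_map, Function.comp_def]

theorem pvColNum_colAt (g : List (List Char)) (c : Nat) :
    pvColNum (pvColAt g c) = pvNumberAt g.dropLast c := by
  unfold pvColNum pvNumberAt pvColAt
  rw [← List.map_dropLast]

theorem pvOp_colAt (g : List (List Char)) (hg : g ≠ []) (c : Nat) :
    (pvColAt g c).getLastD ' ' = (g.getLastD []).getD c ' ' := by
  rcases List.eq_nil_or_concat g with rfl | ⟨init, last, rfl⟩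
  · exact absurd rfl hg
  · simp [pvColAt]

theorem pvBlockBridge (g : List (List Char)) (hg : g ≠ []) (p : Nat) (P : List Nat) :
    pvBlockValue ((p :: P).map (pvColAt g)) =
      pvGroupVal (pvNumberAt g.dropLast) (fun c => (g.getLastD []).getD c ' ') p P := by
  unfold pvBlockValue pvGroupVal pvNumsOf pvEvaluate
  have hnum : (((p :: P).map (pvColAt g)).reverse.map pvColNum).reduceOption =
      ((p :: P).reverse.map (pvNumberAt g.dropLast)).reduceOption := by
    rw [← List.map_reverse, List.map_map]
    congr 1
    exact List.map_congr_left (fun x _ => pvColNum_colAt g x)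
  have hop : (((p :: P).map (pvColAt g)).headD []).getLastD ' ' = (g.getLastD []).getD p ' ' := by
    simp only [List.map_cons, List.headD_cons]
    exact pvOp_colAt g hg p
  rw [hnum, hop]

theorem pvSolveCols_eq (cols : List (List Char)) :
    pvSolveCols cols =
      match cols.dropWhile pvBlank with
      | [] => 0
      | c :: cs =>
          pvBlockValue (c :: cs.takeWhile (fun col => !pvBlank col)) +
          pvSolveCols (cs.dropWhile (fun col => !pvBlank col)) := by
  rw [pvSolveCols]
  split <;> rename_i heq <;> rw [heq]

theorem pvNotBlank_comp (g : List (List Char)) :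
    ((fun col => !pvBlank col) ∘ pvColAt g) = (fun x => !pvIsSep g x) := by
  funext x
  simp [Function.comp, pvBlank_colAt]

theorem pvBridge (g : List (List Char)) (hg : g ≠ []) :
    ∀ (n : Nat) (L : List Nat), L.length ≤ n →
      pvSolveCols (L.map (pvColAt g)) =
        pvG (pvIsSep g) (pvNumberAt g.dropLast) (fun c => (g.getLastD []).getD c ' ') L := by
  intro n
  induction n with
  | zero =>
    intro L hL
    have : L = [] := List.length_eq_zero_iff.mp (Nat.le_zero.mp hL)
    subst this
    rw [pvG_nil, pvSolveCols_eq]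
    simp
  | succ n ih =>
    intro L hL
    cases L with
    | nil =>
      rw [pvG_nil, pvSolveCols_eq]; simp
    | cons c L' =>
      have hL' : L'.length ≤ n := by simpa using hL
      by_cases hsep : pvIsSep g c
      · rw [pvSolveCols_eq]
        rw [List.map_cons, List.dropWhile_cons]
        simp only [pvBlank_colAt, hsep, if_true]
        rw [← pvSolveCols_eq]
        rw [pvG_cons, if_pos hsep]
        exact ih L' hL'
      · rw [pvSolveCols_eq]
        rw [List.map_cons, List.dropWhile_cons]
        simp only [pvBlank_colAt, hsep, Bool.false_eq_true, if_false]
        rw [List.takeWhile_map, List.dropWhile_map, pvNotBlank_comp g]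
        rw [pvG_cons, if_neg hsep]
        have hblock : (pvColAt g c :: (L'.takeWhile (fun x => !pvIsSep g x)).map (pvColAt g)) =
            (c :: L'.takeWhile (fun x => !pvIsSep g x)).map (pvColAt g) := by
          simp
        rw [hblock, pvBlockBridge g hg]
        congr 1
        exact ih _ (le_trans (List.length_dropWhile_le _ _) hL')

-- ---------- A side: characterization of the right-to-left fold ----------

theorem pvNumsOf_cons (N : Nat → Option Int) (c : Nat) (P : List Nat) :
    pvNumsOf N (c :: P) = pvNumsOf N P ++ (N c).toList := by
  simp [pvNumsOf, List.reduceOption_append]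
  cases N c <;> simp

-- A's per-column digit string equals the filtered column
theorem pvNumStr_eq (d : List (List Char)) (col : Nat) :
    d.foldl (fun acc row => if (row.getD col ' ').isDigit then acc ++ [row.getD col ' '] else acc)
        ([] : List Char) =
      (d.map (fun row => row.getD col ' ')).filter Char.isDigit := by
  rw [PySem.List.foldl_append_if (fun row => (row.getD col ' ').isDigit)
    (fun row => row.getD col ' ') d []]
  rw [List.filter_map]
  simp [Function.comp_def]

-- discarding a digit-free leading run does not change the reference value
theorem pvG_drop (s : Nat → Bool) (N : Nat → Option Int) (o : Nat → Char) (L : List Nat)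
    (h : pvNumsOf N (L.takeWhile (fun x => !s x)) = []) :
    pvG s N o (L.dropWhile (fun x => !s x)) = pvG s N o L := by
  cases L with
  | nil => simp
  | cons a L' =>
    by_cases ha : s a
    · simp [ha]
    · rw [List.takeWhile_cons] at h
      simp only [ha, Bool.not_false, if_true] at h ⊢
      rw [List.dropWhile_cons]
      simp only [ha, Bool.not_false, if_true]
      rw [pvG_cons, if_neg (by simp [ha])]
      simp [pvGroupVal, h]

-- peeling a leading run with at least one number off the reference value
theorem pvG_take (s : Nat → Bool) (N : Nat → Option Int) (o : Nat → Char) (L : List Nat)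
    (p : Nat) (ps : List Nat) (h : L.takeWhile (fun x => !s x) = p :: ps)
    (hne : pvNumsOf N (p :: ps) ≠ []) :
    pvG s N o L = pvEvaluate (pvNumsOf N (p :: ps)) (o p) + pvG s N o (L.dropWhile (fun x => !s x)) := by
  cases L with
  | nil => simp at h
  | cons a L' =>
    rw [List.takeWhile_cons] at h
    by_cases ha : s a
    · simp [ha] at h
    · simp only [ha, Bool.not_false, if_true] at h
      obtain ⟨rfl, hps⟩ : a = p ∧ L'.takeWhile (fun x => !s x) = ps := by
        cases h; exact ⟨rfl, rfl⟩
      rw [List.dropWhile_cons]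
      simp only [ha, Bool.not_false, if_true]
      rw [pvG_cons, if_neg (by simp [ha]), hps]
      simp [pvGroupVal, hne]

-- A side: characterization of the right-to-left fold state
theorem pvCharA (g d : List (List Char)) (or : List Char) (L : List Nat) :
    (L.foldr (fun c st => pvStepA g d or st c) (0, [], [])).1 =
        pvG (pvIsSep g) (pvNumberAt d) (fun c => or.getD c ' ') (L.dropWhile (fun x => !pvIsSep g x)) ∧
    (L.foldr (fun c st => pvStepA g d or st c) (0, [], [])).2.1 =
        pvNumsOf (pvNumberAt d) (L.takeWhile (fun x => !pvIsSep g x)) ∧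
    (∀ p ps, L.takeWhile (fun x => !pvIsSep g x) = p :: ps →
      (L.foldr (fun c st => pvStepA g d or st c) (0, [], [])).2.2 = [or.getD p ' ']) := by
  induction L with
  | nil =>
    refine ⟨by simp [pvG_nil], by simp [pvNumsOf], ?_⟩
    intro p ps h
    simp at h
  | cons c L ih =>
    obtain ⟨ih1, ih2, ih3⟩ := ih
    rcases hst : L.foldr (fun c st => pvStepA g d or st c) (0, [], []) with ⟨t1, ns1, op1⟩
    rw [hst] at ih1 ih2 ih3
    dsimp only at ih1 ih2 ih3
    simp only [List.foldr_cons, hst]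
    by_cases hsep : pvIsSep g c
    · have htk : List.takeWhile (fun x => !pvIsSep g x) (c :: L) = [] := by
        simp [hsep]
      have hdrp : List.dropWhile (fun x => !pvIsSep g x) (c :: L) = c :: L := by
        simp [hsep]
      by_cases hns : ns1 = []
      · have hstate : pvStepA g d or (t1, ns1, op1) c = (t1, ns1, op1) := by
          simp [pvStepA, hsep, hns]
        rw [hstate, htk, hdrp]
        refine ⟨?_, by simpa [pvNumsOf] using hns, ?_⟩
        · dsimp only
          rw [pvG_cons, if_pos hsep,
            ← pvG_drop (pvIsSep g) (pvNumberAt d) (fun x => or.getD x ' ') L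
              (by rw [← ih2]; exact hns)]
          exact ih1
        · intro p ps h
          simp at h
      · have hstate : pvStepA g d or (t1, ns1, op1) c =
            (t1 + pvCalcProblem ns1 op1, [], []) := by
          simp [pvStepA, hsep, hns]
        rw [hstate, htk, hdrp]
        refine ⟨?_, by simp [pvNumsOf], ?_⟩
        · dsimp only
          obtain ⟨p, ps, hpp⟩ : ∃ p ps, L.takeWhile (fun x => !pvIsSep g x) = p :: ps := by
            rcases hq : L.takeWhile (fun x => !pvIsSep g x) with _ | ⟨p, ps⟩
            · exact absurd (by rw [ih2, hq]; simp [pvNumsOf]) hns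
            · exact ⟨p, ps, rfl⟩
          have hop : op1 = [or.getD p ' '] := ih3 p ps hpp
          have hcalc : pvCalcProblem ns1 op1 = pvEvaluate ns1 (or.getD p ' ') := by
            rcases hn : ns1 with _ | ⟨n, rest⟩
            · exact absurd hn hns
            · rw [hop, pvCalc_eq_eval]
          rw [pvG_cons, if_pos hsep, hcalc,
            pvG_take (pvIsSep g) (pvNumberAt d) (fun x => or.getD x ' ') L p ps hpp
              (by rw [ih2, hpp] at hns; exact hns)]
          rw [ih1, ih2, hpp]
          ring
        · intro p ps h
          simp at h
    · have htk : List.takeWhile (fun x => !pvIsSep g x) (c :: L) =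
          c :: L.takeWhile (fun x => !pvIsSep g x) := by
        simp [hsep]
      have hdrp : List.dropWhile (fun x => !pvIsSep g x) (c :: L) =
          L.dropWhile (fun x => !pvIsSep g x) := by
        simp [hsep]
      have hstate : pvStepA g d or (t1, ns1, op1) c =
          (t1, (if ((d.foldl (fun acc row =>
              if (row.getD c ' ').isDigit then acc ++ [row.getD c ' '] else acc) []) : List Char) ≠ []
            then ns1 ++ [(PySem.Int.ofChars? (d.foldl (fun acc row =>
              if (row.getD c ' ').isDigit then acc ++ [row.getD c ' '] else acc) [])).getD 0]
            else ns1), [or.getD c ' ']) := by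
        simp [pvStepA, hsep]
      rw [hstate, htk, hdrp]
      refine ⟨ih1, ?_, ?_⟩
      · dsimp only
        rw [pvNumsOf_cons, ← ih2, pvNumStr_eq]
        unfold pvNumberAt
        by_cases hd : ((d.map (fun row => row.getD c ' ')).filter Char.isDigit : List Char) = []
        · rw [if_neg (not_not_intro hd), if_neg (not_not_intro hd)]
          simp
        · rw [if_pos hd, if_pos hd]
          simp
      · intro p ps h
        obtain ⟨rfl, -⟩ : c = p ∧ L.takeWhile (fun x => !pvIsSep g x) = ps := by
          cases h; exact ⟨rfl, rfl⟩
        rfl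

-- A's final flush equals the reference semantics
theorem pvFinishA (g d : List (List Char)) (or : List Char) (L : List Nat) :
    (let st := L.foldr (fun c st => pvStepA g d or st c) (0, [], [])
     if st.2.1 ≠ [] then st.1 + pvCalcProblem st.2.1 st.2.2 else st.1) =
      pvG (pvIsSep g) (pvNumberAt d) (fun c => or.getD c ' ') L := by
  obtain ⟨ch1, ch2, ch3⟩ := pvCharA g d or L
  rcases hst : L.foldr (fun c st => pvStepA g d or st c) (0, [], []) with ⟨t1, ns1, op1⟩
  rw [hst] at ch1 ch2 ch3
  dsimp only at ch1 ch2 ch3 ⊢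
  by_cases hns : ns1 = []
  · rw [if_neg (not_not_intro hns), ch1]
    exact pvG_drop (pvIsSep g) (pvNumberAt d) (fun x => or.getD x ' ') L (by rw [← ch2]; exact hns)
  · rw [if_pos hns]
    obtain ⟨p, ps, hpp⟩ : ∃ p ps, L.takeWhile (fun x => !pvIsSep g x) = p :: ps := by
      rcases hq : L.takeWhile (fun x => !pvIsSep g x) with _ | ⟨p, ps⟩
      · exact absurd (by rw [ch2, hq]; simp [pvNumsOf]) hns
      · exact ⟨p, ps, rfl⟩
    have hcalc : pvCalcProblem ns1 op1 = pvEvaluate ns1 (or.getD p ' ') := by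
      rcases hn : ns1 with _ | ⟨n, rest⟩
      · exact absurd hn hns
      · rw [ch3 p ps hpp, pvCalc_eq_eval]
    rw [hcalc,
      pvG_take (pvIsSep g) (pvNumberAt d) (fun x => or.getD x ' ') L p ps hpp
        (by rw [ch2, hpp] at hns; exact hns)]
    rw [ch1, ch2, hpp]
    ring

-- the two implementations agree on any nonempty worksheet
theorem pvMain (ws : List String) (hws : ws ≠ []) :
    solve_cephalopod_worksheet ws = solve_cephalopod_worksheet_alt ws := by
  have hg : pvGrid ws ≠ [] := by
    simp [pvGrid, hws]
  have hcols : (List.range (pvWidth ws)).map (fun c =>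
      ws.map (fun l => (pvLjust l.toList (pvWidth ws)).getD c ' ')) =
      (List.range (pvWidth ws)).map (pvColAt (pvGrid ws)) := by
    refine List.map_congr_left (fun c _ => ?_)
    simp [pvColAt, pvGrid, List.map_map, Function.comp_def]
  show (let grid := pvGrid ws
        let digit_rows := grid.dropLast
        let op_row := grid.getLastD []
        let st := ((List.range (pvWidth ws)).reverse).foldl (pvStepA grid digit_rows op_row) (0, [], [])
        if st.2.1 ≠ [] then st.1 + pvCalcProblem st.2.1 st.2.2 else st.1) = _
  rw [solve_cephalopod_worksheet_alt]
  dsimp only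
  rw [hcols, pvBridge (pvGrid ws) hg (List.range (pvWidth ws)).length (List.range (pvWidth ws)) le_rfl]
  rw [List.foldl_reverse]
  exact pvFinishA (pvGrid ws) (pvGrid ws).dropLast ((pvGrid ws).getLastD []) (List.range (pvWidth ws))

-- ===== VERDICT (by name: the statement is the Claim_ definition above) =====
theorem solve_cephalopod_worksheet_spec : Claim_equal_solve_cephalopod_worksheet := by
  intro ws _hDom hPre
  unfold Spec_solve_cephalopod_worksheet
  exact pvMain ws hPre
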